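-- pv_equiv track=rewrite | github.com/kmk142789/kmk142789 | atlas/reporting.py | _extract_address
-- ===== SOURCE A (Python) =====
-- from typing import Dict, Iterable, List, Sequence
--
-- def _extract_address(text: str) -> str | None:
--     fence = "```"
--     blocks: List[str] = []
--     collecting = False
--     buffer: List[str] = []
--     for raw in text.splitlines():
--         line = raw.strip()
--         if line.startswith(fence):
--             if collecting:
--                 if buffer:
--                     blocks.append("\n".join(buffer).strip())
--                 buffer = []
--                 collecting = False
--             else:
--                 collecting = True
--                 buffer = []
--         elif collecting:
--             buffer.append(line)
--     if collecting and buffer: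
--         blocks.append("\n".join(buffer).strip())
--     for block in reversed(blocks):
--         if block:
--             return block.splitlines()[0].strip()
--     return None
-- ===== SOURCE B (Python) =====
-- def _extract_address(text: str) -> str | None:
--     fence = "```"
--     lines = [raw.strip() for raw in text.splitlines()]
--     n = len(lines)
--     blocks = []
--     i = 0
--     while i < n:
--         if lines[i].startswith(fence):
--             j = i + 1
--             while j < n and not lines[j].startswith(fence):
--                 j += 1
--             inner = lines[i + 1:j]
--             if inner:
--                 blocks.append("\n".join(inner).strip())
--             i = j + 1
--         else:
--             i += 1
--     for block in reversed(blocks):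
--         if block:
--             return block.splitlines()[0].strip()
--     return None
-- ===== Notes on version B (the rewrite author's own statement) =====
-- stated objective: alternative
-- what changed: Replaces A's one-pass boolean state machine (collecting flag + growing buffer) with an index-pair scan: strip all lines once, then repeatedly jump from an opening fence to the next fence and slice the lines in between as a block.
import Mathlib
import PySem

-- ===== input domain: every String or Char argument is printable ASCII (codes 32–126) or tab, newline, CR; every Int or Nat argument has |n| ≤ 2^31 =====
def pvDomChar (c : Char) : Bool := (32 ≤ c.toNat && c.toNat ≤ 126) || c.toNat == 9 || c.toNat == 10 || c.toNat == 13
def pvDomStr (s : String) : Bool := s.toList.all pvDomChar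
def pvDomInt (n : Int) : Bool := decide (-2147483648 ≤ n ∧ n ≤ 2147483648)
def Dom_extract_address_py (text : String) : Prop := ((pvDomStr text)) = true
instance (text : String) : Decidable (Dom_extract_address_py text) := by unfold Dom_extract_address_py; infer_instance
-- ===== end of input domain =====

-- B replaces A's one-pass collecting-flag state machine by an index-pair fence scan (jump from fence to fence, slice the lines between); same return value, proved equal.

-- ===== PORT A =====
-- one loop step of A's state machine; state = (blocks, collecting, buffer); line is the stripped raw line
def pvStepCore (st : List String × Bool × List String) (line : String) :
    List String × Bool × List String :=
  let (blocks, collecting, buffer) := st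
  if PySem.Str.startswith line "```" then
    if collecting then
      ((if buffer.isEmpty then blocks
        else blocks ++ [PySem.Str.strip (PySem.Str.join "\n" buffer)]), false, [])
    else (blocks, true, [])
  else if collecting then (blocks, collecting, buffer ++ [line])
  else st

-- A's trailing 'if collecting and buffer:' flush
def pvFinishA (st : List String × Bool × List String) : List String :=
  if st.2.1 && !st.2.2.isEmpty then st.1 ++ [PySem.Str.strip (PySem.Str.join "\n" st.2.2)]
  else st.1

-- A's final 'for block in reversed(blocks)' loop (applied to blocks.reverse);
-- block ≠ "" guarantees splitlines is nonempty, so Python's [0] never raises (headD "" is exact here)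
def pvPickA : List String → Option String
  | [] => none
  | b :: bs =>
    if b == "" then pvPickA bs
    else some (PySem.Str.strip ((PySem.Str.splitlines b).headD ""))

def extract_address_py (text : String) : Option String :=
  pvPickA (pvFinishA ((PySem.Str.splitlines text).foldl
      (fun st raw => pvStepCore st (PySem.Str.strip raw)) ([], false, []))).reverse

-- ===== PORT B =====
-- the inner 'while j < n' scan: (lines strictly before the next fence, lines after it)
def pvSplitAtFence : List String → List String × List String
  | [] => ([], [])
  | l :: ls =>
    if PySem.Str.startswith l "```" then ([], ls)
    else
      let p := pvSplitAtFence ls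
      (l :: p.1, p.2)

-- needed by pvBlocksB's termination proof
theorem pvSplitAtFence_snd_length (ls : List String) :
    (pvSplitAtFence ls).2.length ≤ ls.length := by
  induction ls with
  | nil => simp [pvSplitAtFence]
  | cons l ls ih =>
    simp only [pvSplitAtFence]
    split
    · simp
    · simpa using Nat.le_succ_of_le ih

-- the outer 'while i < n' scan over the (already stripped) lines
def pvBlocksB : List String → List String
  | [] => []
  | l :: ls =>
    if PySem.Str.startswith l "```" then
      let p := pvSplitAtFence ls
      (if p.1.isEmpty then [] else [PySem.Str.strip (PySem.Str.join "\n" p.1)]) ++ pvBlocksB p.2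
    else pvBlocksB ls
termination_by ls => ls.length
decreasing_by
  · exact Nat.lt_succ_of_le (pvSplitAtFence_snd_length ls)
  · simp

-- B's final reverse scan (same tail loop as A's)
def pvPickB : List String → Option String
  | [] => none
  | b :: bs =>
    if b == "" then pvPickB bs
    else some (PySem.Str.strip ((PySem.Str.splitlines b).headD ""))

def extract_address_py_alt (text : String) : Option String :=
  pvPickB (pvBlocksB ((PySem.Str.splitlines text).map PySem.Str.strip)).reverse

-- ===== PRECONDITION & SPEC =====
def Spec_extract_address_py (text : String) (out : Option String) : Prop := out = extract_address_py_alt text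
instance (text : String) (out : Option String) : Decidable (Spec_extract_address_py text out) := by unfold Spec_extract_address_py; infer_instance

-- ===== CLAIM (what is proved, stated in full; the proofs are below) =====
def Claim_equal_extract_address_py : Prop := ∀ (text : String), Dom_extract_address_py text → Spec_extract_address_py text (extract_address_py text)

-- ===== LEMMAS AND PROOFS =====

-- value of the block A is currently collecting, if the remaining lines are ls and the buffer is buf
def pvEmitClose (buf : List String) (ls : List String) : List String :=
  let p := pvSplitAtFence ls
  (if (buf ++ p.1).isEmpty then [] else [PySem.Str.strip (PySem.Str.join "\n" (buf ++ p.1))])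
    ++ pvBlocksB p.2

theorem pvLoop_eq (ls : List String) :
    (∀ bs buf, pvFinishA (ls.foldl pvStepCore (bs, false, buf)) = bs ++ pvBlocksB ls)
    ∧ (∀ bs buf, pvFinishA (ls.foldl pvStepCore (bs, true, buf)) = bs ++ pvEmitClose buf ls) := by
  induction ls with
  | nil =>
    constructor
    · intro bs buf; simp [pvFinishA, pvBlocksB]
    · intro bs buf
      simp only [List.foldl_nil, pvFinishA, pvEmitClose, pvSplitAtFence, pvBlocksB,
        List.append_nil]
      by_cases h : buf.isEmpty <;> simp [h]
  | cons l ls ih =>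
    have htl : "```".toList = ['`', '`', '`'] := rfl
    have hcases := Bool.eq_false_or_eq_true (PySem.Chars.startswith l.toList "```".toList)
    constructor
    · intro bs buf
      rcases hcases with hf | hf <;> rw [htl] at hf
      · -- fence line: A switches to collecting, B opens a block
        simp only [List.foldl_cons, pvStepCore, PySem.Str.startswith_eq, htl, hf,
          Bool.false_eq_true, if_false, reduceIte]
        rw [ih.2]
        rw [pvBlocksB]
        simp [hf, pvEmitClose]
      · simp only [List.foldl_cons, pvStepCore, PySem.Str.startswith_eq, htl, hf,
          Bool.false_eq_true, if_false]
        rw [ih.1]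
        rw [pvBlocksB]
        simp [hf]
    · intro bs buf
      rcases hcases with hf | hf <;> rw [htl] at hf
      · -- fence line while collecting: A flushes the buffer, B closes the slice here
        simp only [List.foldl_cons, pvStepCore, PySem.Str.startswith_eq, htl, hf,
          reduceIte]
        rw [ih.1]
        simp only [pvEmitClose, pvSplitAtFence, PySem.Str.startswith_eq, htl, hf, reduceIte]
        by_cases hb : buf.isEmpty <;> simp [hb]
      · simp only [List.foldl_cons, pvStepCore, PySem.Str.startswith_eq, htl, hf,
          Bool.false_eq_true, if_false, reduceIte]
        rw [ih.2]
        simp only [pvEmitClose, pvSplitAtFence, PySem.Str.startswith_eq, htl, hf,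
          Bool.false_eq_true, if_false]
        simp [List.append_assoc]

theorem pvPick_eq (bs : List String) : pvPickA bs = pvPickB bs := by
  induction bs with
  | nil => rfl
  | cons b bs ih => simp only [pvPickA, pvPickB, ih]

-- ===== VERDICT (by name: the statement is the Claim_ definition above) =====
theorem extract_address_py_spec : Claim_equal_extract_address_py := by
  intro text _
  unfold Spec_extract_address_py extract_address_py extract_address_py_alt
  rw [← List.foldl_map (f := PySem.Str.strip) (g := pvStepCore)]
  rw [(pvLoop_eq _).1 [] []]
  simp [pvPick_eq]
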